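-- pv_equiv track=rewrite | github.com/Allen-Bayern/relearn-cs | src/localMax/local_max.py | solution
-- ===== SOURCE A (Python) =====
-- def solution(arr):
--     '''
--     公式：result = min(localArea) * sum(localArea)
--
--     局部最大值的思路：
--     1. 局部至少包含1个，至多包含所有。
--     也就是说，假设数组arr的长度为length。那么局部区间localArea的长度localLength必然是1<= localLength <= length。
--     2. 设定两个指针start与terminal，满足start + localLength - 1 = terminal。
--     然后按上一步推导，求每个满足条件的localLength下的局部区间localArea的result。
--     3. 不妨先给result设定一个初值：result = min(arr) * sum(arr)，也就是全局情况下是多少。然后执行第2步。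
--     如果局部的result一旦大于初值，就更新。如此一来便求得。
--     '''
--
--     # initialize result
--     res = min(arr) * sum(arr)
--
--     # 用for循环执行第二步
--     for length in range(1, len(arr)):
--         if length == 1:
--             # 如果是仅有一个变量的区间，那么公式实质上变为该数自身的平方
--             for elem in arr:
--                 # 用临时变量捕获计算结果
--                 temp = elem ** 2
--                 if temp > res:
--                     res = temp
--         else:
--             # 从第一个位置遍历起
--             start = 0
--             terminal = length - 1
--             while terminal < len(arr):
--                 localArea = arr[start: terminal + 1 :]
--                 temp = min(localArea) * sum(localArea)
--                 if temp > res: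
--                     res = temp
--                 start += 1
--                 terminal += 1
--
--     return res
-- ===== SOURCE B (Python) =====
-- def solution(arr):
--     # O(n^2): for each start, extend the end keeping the running sum and running min.
--     best = arr[0] * arr[0]
--     n = len(arr)
--     for i in range(n):
--         s = 0
--         m = arr[i]
--         for j in range(i, n):
--             s += arr[j]
--             m = min(m, arr[j])
--             best = max(best, m * s)
--     return best
-- ===== Notes on version B (the rewrite author's own statement) =====
-- stated objective: faster
-- what changed: Replaces A's per-length sliding windows that re-slice and rescan each subarray (min+sum per window) with a two-loop scan that, for each start index, extends the end while updating the running sum and running min incrementally.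
import Mathlib
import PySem

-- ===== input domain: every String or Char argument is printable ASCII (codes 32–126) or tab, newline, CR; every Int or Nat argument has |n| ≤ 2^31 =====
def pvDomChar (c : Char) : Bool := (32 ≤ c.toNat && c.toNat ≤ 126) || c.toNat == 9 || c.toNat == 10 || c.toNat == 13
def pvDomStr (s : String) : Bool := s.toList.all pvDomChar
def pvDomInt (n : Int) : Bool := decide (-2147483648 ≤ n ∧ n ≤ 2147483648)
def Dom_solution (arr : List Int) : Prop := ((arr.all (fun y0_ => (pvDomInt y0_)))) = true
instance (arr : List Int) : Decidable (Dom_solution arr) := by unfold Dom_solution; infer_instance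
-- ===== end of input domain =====

-- B replaces A's per-length sliding windows (which re-slice and rescan each subarray) with a
-- per-start scan keeping a running sum and running min; equivalence is proved on nonempty lists.

-- ===== PORT A =====
-- the inner 'while terminal < len(arr)' loop of A
def solWhile (arr : List Int) (start terminal res : Int) : Int :=
  if _h : terminal < (arr.length : Int) then
    let localArea := PySem.List.slice arr (some start) (some (terminal + 1))
    let temp := (PySem.List.min? localArea (fun x => x)).getD 0 * localArea.sum
    solWhile arr (start + 1) (terminal + 1) (if temp > res then temp else res)
  else res
termination_by ((arr.length : Int) - terminal).toNat
decreasing_by omega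

def solution (arr : List Int) : Int :=
  let res := (PySem.List.min? arr (fun x => x)).getD 0 * arr.sum
  (PySem.List.pyRange 1 (arr.length : Int) 1).foldl
    (fun res length =>
      if length = 1 then
        arr.foldl (fun res elem =>
          let temp := elem ^ 2
          if temp > res then temp else res) res
      else
        solWhile arr 0 (length - 1) res)
    res

-- ===== PORT B =====
-- the inner 'for j in range(i, n)' loop of B, state (s, m, best)
def altInner (arr : List Int) (i best : Int) : Int :=
  ((PySem.List.pyRange i (arr.length : Int) 1).foldl
    (fun st j =>
      (st.1 + PySem.List.pyGetD arr j 0,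
       min st.2.1 (PySem.List.pyGetD arr j 0),
       max st.2.2 (min st.2.1 (PySem.List.pyGetD arr j 0) * (st.1 + PySem.List.pyGetD arr j 0))))
    (0, PySem.List.pyGetD arr i 0, best)).2.2

def solution_alt (arr : List Int) : Int :=
  (PySem.List.pyRange 0 (arr.length : Int) 1).foldl
    (fun best i => altInner arr i best)
    (PySem.List.pyGetD arr 0 0 * PySem.List.pyGetD arr 0 0)

-- ===== PRECONDITION & SPEC =====
-- Pre: Python A raises ValueError (min of empty sequence) on [], B raises IndexError there.
def Pre_solution (arr : List Int) : Prop := arr ≠ []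
instance (arr : List Int) : Decidable (Pre_solution arr) := by unfold Pre_solution; infer_instance
def pvWitness_solution : List Int := [1, -2, 3]

def Spec_solution (arr : List Int) (out : Int) : Prop := out = solution_alt arr
instance (arr : List Int) (out : Int) : Decidable (Spec_solution arr out) := by unfold Spec_solution; infer_instance

-- ===== CLAIM (what is proved, stated in full; the proofs are below) =====
def Claim_equal_solution : Prop := ∀ (arr : List Int), Dom_solution arr → Pre_solution arr → Spec_solution arr (solution arr)


-- ===== LEMMAS AND PROOFS =====

-- min/f/window vocabulary used by the proofs
def minf (l : List Int) : Int := (PySem.List.min? l (fun x => x)).getD 0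
def fval (l : List Int) : Int := minf l * l.sum
def win (arr : List Int) (p len : Nat) : List Int := (arr.drop p).take len

lemma if_gt_eq_max (r v : Int) : (if v > r then v else r) = max r v := by
  rw [max_def]; split_ifs <;> omega

lemma minf_cons (x : Int) (t : List Int) : minf (x :: t) = t.foldl min x := by
  simp [minf, PySem.List.min?_id_cons]

lemma minf_append (w : List Int) (hw : w ≠ []) (y : Int) :
    minf (w ++ [y]) = min (minf w) y := by
  obtain ⟨x, t, rfl⟩ := List.exists_cons_of_ne_nil hw
  simp [List.cons_append, minf_cons, List.foldl_append]

lemma fval_singleton (x : Int) : fval [x] = x * x := by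
  simp [fval, minf_cons]

lemma win_one (arr : List Int) (p : Nat) (h : p < arr.length) : win arr p 1 = [arr[p]] := by
  rw [win, List.drop_eq_getElem_cons h]
  rfl

lemma win_one_add (arr : List Int) (p q : Nat) :
    win arr p (1 + q) = win arr p 1 ++ (arr.drop (p + 1)).take q := by
  rw [win, win, List.take_add, List.drop_drop]

lemma win_zero_length (arr : List Int) : win arr 0 arr.length = arr := by
  simp [win]

-- ---------- B side ----------

def bstep (st : Int × Int × Int) (v : Int) : Int × Int × Int :=
  (st.1 + v, min st.2.1 v, max st.2.2 (min st.2.1 v * (st.1 + v)))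

lemma bstep_state (w : List Int) (hw : w ≠ []) (best x : Int) :
    bstep (w.sum, minf w, best) x = ((w ++ [x]).sum, minf (w ++ [x]), max best (fval (w ++ [x]))) := by
  simp [bstep, List.sum_append, minf_append w hw, fval]

lemma innerB_spec : ∀ (l w : List Int) (best : Int), w ≠ [] →
    best ≤ (l.foldl bstep (w.sum, minf w, best)).2.2 ∧
    ((l.foldl bstep (w.sum, minf w, best)).2.2 = best ∨
      ∃ q : Nat, 1 ≤ q ∧ q ≤ l.length ∧
        (l.foldl bstep (w.sum, minf w, best)).2.2 = fval (w ++ l.take q)) ∧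
    (∀ q : Nat, 1 ≤ q → q ≤ l.length →
      fval (w ++ l.take q) ≤ (l.foldl bstep (w.sum, minf w, best)).2.2) := by
  intro l
  induction l with
  | nil =>
    intro w best hw
    refine ⟨le_refl _, Or.inl rfl, ?_⟩
    intro q hq hql
    simp at hql; omega
  | cons x xs ih =>
    intro w best hw
    have hstep : (x :: xs).foldl bstep (w.sum, minf w, best)
        = xs.foldl bstep ((w ++ [x]).sum, minf (w ++ [x]), max best (fval (w ++ [x]))) := by
      rw [List.foldl_cons, bstep_state w hw]
    obtain ⟨ih1, ih2, ih3⟩ := ih (w ++ [x]) (max best (fval (w ++ [x]))) (by simp)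
    rw [hstep]
    refine ⟨le_trans (le_max_left _ _) ih1, ?_, ?_⟩
    · rcases ih2 with h | ⟨q, hq1, hq2, hq3⟩
      · rcases max_choice best (fval (w ++ [x])) with hm | hm
        · exact Or.inl (by rw [h, hm])
        · refine Or.inr ⟨1, le_refl _, by simp, ?_⟩
          rw [h, hm]; simp
      · refine Or.inr ⟨q + 1, by omega, by simp; omega, ?_⟩
        rw [hq3, List.take_succ_cons]
        simp
    · intro q hq hql
      obtain ⟨q', rfl⟩ : ∃ q', q = q' + 1 := ⟨q - 1, by omega⟩
      rw [List.take_succ_cons]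
      rcases Nat.eq_zero_or_pos q' with h0 | h0
      · subst h0
        simpa using le_trans (le_max_right best (fval (w ++ [x]))) ih1
      · have h := ih3 q' h0 (by simp at hql; omega)
        simpa using h

lemma altInner_eq (arr : List Int) (i best : Int) (hi : 0 ≤ i) :
    altInner arr i best
      = ((arr.drop i.toNat).foldl bstep (0, PySem.List.pyGetD arr i 0, best)).2.2 := by
  have h := PySem.List.foldl_pyRange_pyGetD' arr 0 bstep (0, PySem.List.pyGetD arr i 0, best) hi
  exact congrArg (fun t => t.2.2) h

lemma altInner_spec (arr : List Int) (i : Nat) (hin : i < arr.length) (best : Int) :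
    best ≤ altInner arr (i : Int) best ∧
    (altInner arr (i : Int) best = best ∨
      ∃ p len : Nat, 1 ≤ len ∧ p + len ≤ arr.length ∧ altInner arr (i : Int) best = fval (win arr p len)) ∧
    (∀ len : Nat, 1 ≤ len → i + len ≤ arr.length →
      fval (win arr i len) ≤ altInner arr (i : Int) best) := by
  have hget : PySem.List.pyGetD arr (i : Int) 0 = arr[i] := by
    rw [PySem.List.pyGetD_of_nonneg arr 0 (by positivity)]
    simp [List.getD_eq_getElem?_getD, hin]
  have hdrop : arr.drop i = arr[i] :: arr.drop (i + 1) := List.drop_eq_getElem_cons hin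
  have hone : win arr i 1 = [arr[i]] := win_one arr i hin
  have hfirst : bstep (0, PySem.List.pyGetD arr (i : Int) 0, best) arr[i]
      = ((win arr i 1).sum, minf (win arr i 1), max best (fval (win arr i 1))) := by
    simp [bstep, hget, hone, minf_cons, fval_singleton]
  have heq : altInner arr (i : Int) best
      = ((arr.drop (i + 1)).foldl bstep
          ((win arr i 1).sum, minf (win arr i 1), max best (fval (win arr i 1)))).2.2 := by
    rw [altInner_eq arr (i : Int) best (by positivity)]
    simp only [Int.toNat_natCast]
    rw [hdrop, List.foldl_cons, hfirst]
  obtain ⟨h1, h2, h3⟩ := innerB_spec (arr.drop (i + 1)) (win arr i 1)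
      (max best (fval (win arr i 1))) (by rw [hone]; simp)
  rw [heq]
  have hlen : (arr.drop (i + 1)).length = arr.length - (i + 1) := by simp
  refine ⟨le_trans (le_max_left _ _) h1, ?_, ?_⟩
  · rcases h2 with h | ⟨q, hq1, hq2, hq3⟩
    · rcases max_choice best (fval (win arr i 1)) with hm | hm
      · exact Or.inl (by rw [h, hm])
      · refine Or.inr ⟨i, 1, le_refl _, by omega, by rw [h, hm]⟩
    · refine Or.inr ⟨i, 1 + q, by omega, by rw [hlen] at hq2; omega, ?_⟩
      rw [hq3, win_one_add]
  · intro len hl hle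
    obtain ⟨q', rfl⟩ : ∃ q', len = 1 + q' := ⟨len - 1, by omega⟩
    rcases Nat.eq_zero_or_pos q' with h0 | h0
    · subst h0
      exact le_trans (le_max_right best (fval (win arr i 1))) h1
    · rw [win_one_add]
      exact h3 q' h0 (by rw [hlen]; omega)

lemma outerB_spec (arr : List Int) : ∀ (k : Nat) (i : Nat) (best : Int), arr.length - i = k →
    best ≤ (PySem.List.pyRange (i : Int) (arr.length : Int) 1).foldl (fun best i => altInner arr i best) best ∧
    ((PySem.List.pyRange (i : Int) (arr.length : Int) 1).foldl (fun best i => altInner arr i best) best = best ∨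
      ∃ p len : Nat, 1 ≤ len ∧ p + len ≤ arr.length ∧
        (PySem.List.pyRange (i : Int) (arr.length : Int) 1).foldl (fun best i => altInner arr i best) best = fval (win arr p len)) ∧
    (∀ p len : Nat, i ≤ p → 1 ≤ len → p + len ≤ arr.length →
      fval (win arr p len) ≤ (PySem.List.pyRange (i : Int) (arr.length : Int) 1).foldl (fun best i => altInner arr i best) best) := by
  intro k
  induction k with
  | zero =>
    intro i best hk
    have hni : arr.length ≤ i := by omega
    rw [PySem.List.pyRange_one_eq_nil (by exact_mod_cast hni)]
    refine ⟨le_refl _, Or.inl rfl, ?_⟩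
    intro p len hp hl hpl
    omega
  | succ k ih =>
    intro i best hk
    have hin : i < arr.length := by omega
    have hk2 : arr.length - (i + 1) = k := by omega
    rw [PySem.List.pyRange_one_cons (by exact_mod_cast hin), List.foldl_cons]
    have hcast : (i : Int) + 1 = ((i + 1 : Nat) : Int) := by push_cast; ring
    rw [hcast]
    obtain ⟨a1, a2, a3⟩ := altInner_spec arr i hin best
    obtain ⟨ih1, ih2, ih3⟩ := ih (i + 1) (altInner arr (i : Int) best) hk2
    refine ⟨le_trans a1 ih1, ?_, ?_⟩
    · rcases ih2 with h | hwin
      · rcases a2 with h2 | ⟨p, len, hl, hpl, h2⟩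
        · exact Or.inl (by rw [h, h2])
        · exact Or.inr ⟨p, len, hl, hpl, by rw [h, h2]⟩
      · exact Or.inr hwin
    · intro p len hp hl hpl
      rcases Nat.eq_or_lt_of_le hp with rfl | hlt
      · exact le_trans (a3 len hl hpl) ih1
      · exact ih3 p len (by omega) hl hpl

lemma B_char (arr : List Int) (hne : arr ≠ []) :
    (∃ p len : Nat, 1 ≤ len ∧ p + len ≤ arr.length ∧ solution_alt arr = fval (win arr p len)) ∧
    (∀ p len : Nat, 1 ≤ len → p + len ≤ arr.length → fval (win arr p len) ≤ solution_alt arr) := by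
  have hn : 0 < arr.length := List.length_pos_of_ne_nil hne
  have hget : PySem.List.pyGetD arr 0 0 = arr[0] := by
    rw [PySem.List.pyGetD_of_nonneg arr 0 (le_refl 0)]
    simp [List.getD_eq_getElem?_getD, hn]
  have hb0 : PySem.List.pyGetD arr 0 0 * PySem.List.pyGetD arr 0 0 = fval (win arr 0 1) := by
    rw [hget, win_one arr 0 hn, fval_singleton]
  have hsol : solution_alt arr
      = (PySem.List.pyRange ((0 : Nat) : Int) (arr.length : Int) 1).foldl
          (fun best i => altInner arr i best) (PySem.List.pyGetD arr 0 0 * PySem.List.pyGetD arr 0 0) := by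
    simp [solution_alt]
  obtain ⟨h1, h2, h3⟩ := outerB_spec arr arr.length 0 (PySem.List.pyGetD arr 0 0 * PySem.List.pyGetD arr 0 0) (by omega)
  constructor
  · rcases h2 with h | hwin
    · exact ⟨0, 1, le_refl _, by omega, by rw [hsol, h, hb0]⟩
    · obtain ⟨p, len, hl, hpl, h⟩ := hwin
      exact ⟨p, len, hl, hpl, by rw [hsol, h]⟩
  · intro p len hl hpl
    rw [hsol]
    exact h3 p len (by omega) hl hpl

-- ---------- A side ----------

lemma sqfold_spec (arr : List Int) (res : Int) :
    res ≤ arr.foldl (fun res elem => let temp := elem ^ 2; if temp > res then temp else res) res ∧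
    (arr.foldl (fun res elem => let temp := elem ^ 2; if temp > res then temp else res) res = res ∨
      ∃ e ∈ arr, arr.foldl (fun res elem => let temp := elem ^ 2; if temp > res then temp else res) res = e ^ 2) ∧
    (∀ e ∈ arr, e ^ 2 ≤ arr.foldl (fun res elem => let temp := elem ^ 2; if temp > res then temp else res) res) := by
  have hfun : (fun (res elem : Int) => let temp := elem ^ 2; if temp > res then temp else res)
      = fun res elem => max res (elem ^ 2) := by
    funext r e
    exact if_gt_eq_max r (e ^ 2)
  rw [hfun]
  obtain ⟨h1, h2⟩ := PySem.List.le_foldl_max_int arr (fun e => e ^ 2) res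
  refine ⟨h1, ?_, h2⟩
  have hmap : arr.foldl (fun acc y => max acc (y ^ 2)) res = (arr.map (fun e => e ^ 2)).foldl max res := by
    rw [List.foldl_map]
  rcases PySem.List.foldl_max_mem (arr.map (fun e => e ^ 2)) res with h | h
  · exact Or.inl (by rw [hmap, h])
  · obtain ⟨e, he, heq⟩ := List.mem_map.mp h
    exact Or.inr ⟨e, he, by rw [hmap, heq]⟩

lemma e_sq_as_win (arr : List Int) (p : Nat) (hp : p < arr.length) :
    arr[p] ^ 2 = fval (win arr p 1) := by
  rw [win_one arr p hp, fval_singleton, pow_two]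

lemma whileA_spec (arr : List Int) (L : Int) (hL : 1 ≤ L) :
    ∀ (k : Nat) (start res : Int), 0 ≤ start → ((arr.length : Int) - (start + L - 1)).toNat = k →
    res ≤ solWhile arr start (start + L - 1) res ∧
    (solWhile arr start (start + L - 1) res = res ∨
      ∃ p len : Nat, 1 ≤ len ∧ p + len ≤ arr.length ∧
        solWhile arr start (start + L - 1) res = fval (win arr p len)) ∧
    (∀ p : Nat, start ≤ (p : Int) → p + L.toNat ≤ arr.length →
      fval (win arr p L.toNat) ≤ solWhile arr start (start + L - 1) res) := by
  intro k
  induction k with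
  | zero =>
    intro start res hs hk
    have hterm : ¬ (start + L - 1 < (arr.length : Int)) := by omega
    rw [solWhile, dif_neg hterm]
    refine ⟨le_refl _, Or.inl rfl, ?_⟩
    intro p hp hpl
    exfalso
    have : ((p : Int)) + L ≤ (arr.length : Int) := by
      have := hpl
      omega
    omega
  | succ k ih =>
    intro start res hs hk
    have hterm : start + L - 1 < (arr.length : Int) := by omega
    have hL1 : 1 ≤ L.toNat := by omega
    rw [solWhile, dif_pos hterm]
    have hslice : PySem.List.slice arr (some start) (some (start + L - 1 + 1))
        = win arr start.toNat L.toNat := by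
      rw [PySem.List.slice_toNat arr hs (by omega), win]
      congr 1
      omega
    have hwinok : start.toNat + L.toNat ≤ arr.length := by omega
    have htempf : (PySem.List.min? (PySem.List.slice arr (some start) (some (start + L - 1 + 1))) (fun x => x)).getD 0
        * (PySem.List.slice arr (some start) (some (start + L - 1 + 1))).sum
        = fval (win arr start.toNat L.toNat) := by
      rw [hslice]; rfl
    have harg : start + 1 + L - 1 = start + L - 1 + 1 := by ring
    have hs1 : (0 : Int) ≤ start + 1 := by omega
    have hk1 : ((arr.length : Int) - (start + 1 + L - 1)).toNat = k := by omega
    obtain ⟨ih1, ih2, ih3⟩ := ih (start + 1)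
      (if fval (win arr start.toNat L.toNat) > res then fval (win arr start.toNat L.toNat) else res)
      hs1 hk1
    rw [harg] at ih1 ih2 ih3
    simp only [htempf]
    refine ⟨?_, ?_, ?_⟩
    · refine le_trans ?_ ih1
      split_ifs with h <;> omega
    · rcases ih2 with h | hwin
      · by_cases hgt : fval (win arr start.toNat L.toNat) > res
        · rw [h, if_pos hgt]
          exact Or.inr ⟨start.toNat, L.toNat, hL1, hwinok, rfl⟩
        · rw [h, if_neg hgt]
          exact Or.inl rfl
      · exact Or.inr hwin
    · intro p hp hpl
      by_cases hpe : (p : Int) = start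
      · subst hpe
        simp only [Int.toNat_natCast] at ih1 ⊢
        refine le_trans ?_ ih1
        split_ifs with h
        · exact le_refl _
        · exact le_of_not_gt h
      · have hps : start + 1 ≤ (p : Int) := by
          clear ih1 ih2 ih3
          omega
        exact ih3 p hps hpl

lemma outerA_spec (arr : List Int) : ∀ (lens : List Int) (res : Int), (∀ L ∈ lens, 1 ≤ L) →
    res ≤ lens.foldl (fun res length => if length = 1 then
        arr.foldl (fun res elem => let temp := elem ^ 2; if temp > res then temp else res) res
      else solWhile arr 0 (length - 1) res) res ∧
    (lens.foldl (fun res length => if length = 1 then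
        arr.foldl (fun res elem => let temp := elem ^ 2; if temp > res then temp else res) res
      else solWhile arr 0 (length - 1) res) res = res ∨
      ∃ p len : Nat, 1 ≤ len ∧ p + len ≤ arr.length ∧
        lens.foldl (fun res length => if length = 1 then
            arr.foldl (fun res elem => let temp := elem ^ 2; if temp > res then temp else res) res
          else solWhile arr 0 (length - 1) res) res = fval (win arr p len)) ∧
    (∀ L ∈ lens, ∀ p : Nat, p + L.toNat ≤ arr.length →
      fval (win arr p L.toNat) ≤ lens.foldl (fun res length => if length = 1 then
          arr.foldl (fun res elem => let temp := elem ^ 2; if temp > res then temp else res) res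
        else solWhile arr 0 (length - 1) res) res) := by
  intro lens
  induction lens with
  | nil =>
    intro res _
    exact ⟨le_refl _, Or.inl rfl, by intro L hL; simp at hL⟩
  | cons L rest ih =>
    intro res hall
    have hL : 1 ≤ L := hall L (List.mem_cons_self)
    rw [List.foldl_cons]
    -- facts about the one step
    have step_spec :
        res ≤ (if L = 1 then
            arr.foldl (fun res elem => let temp := elem ^ 2; if temp > res then temp else res) res
          else solWhile arr 0 (L - 1) res) ∧
        ((if L = 1 then
            arr.foldl (fun res elem => let temp := elem ^ 2; if temp > res then temp else res) res
          else solWhile arr 0 (L - 1) res) = res ∨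
          ∃ p len : Nat, 1 ≤ len ∧ p + len ≤ arr.length ∧
            (if L = 1 then
              arr.foldl (fun res elem => let temp := elem ^ 2; if temp > res then temp else res) res
            else solWhile arr 0 (L - 1) res) = fval (win arr p len)) ∧
        (∀ p : Nat, p + L.toNat ≤ arr.length →
          fval (win arr p L.toNat) ≤ (if L = 1 then
            arr.foldl (fun res elem => let temp := elem ^ 2; if temp > res then temp else res) res
          else solWhile arr 0 (L - 1) res)) := by
      by_cases hL1 : L = 1
      · subst hL1
        simp only [if_pos trivial]
        obtain ⟨s1, s2, s3⟩ := sqfold_spec arr res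
        refine ⟨s1, ?_, ?_⟩
        · rcases s2 with h | ⟨e, he, heq⟩
          · exact Or.inl h
          · obtain ⟨p, hp, hpe⟩ := List.mem_iff_getElem.mp he
            refine Or.inr ⟨p, 1, le_refl _, by omega, ?_⟩
            rw [heq, ← hpe, e_sq_as_win arr p hp]
        · intro p hpl
          have hp : p < arr.length := by simp at hpl ⊢; omega
          have := s3 arr[p] (List.getElem_mem hp)
          rw [e_sq_as_win arr p hp] at this
          simpa using this
      · simp only [if_neg hL1]
        have hzero : (0 : Int) + L - 1 = L - 1 := by ring
        obtain ⟨w1, w2, w3⟩ := whileA_spec arr L hL (((arr.length : Int) - (0 + L - 1)).toNat) 0 res (le_refl _) rfl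
        rw [hzero] at w1 w2 w3
        exact ⟨w1, w2, fun p hpl => w3 p (by positivity) hpl⟩
    obtain ⟨s1, s2, s3⟩ := step_spec
    obtain ⟨ih1, ih2, ih3⟩ := ih _ (fun L' hL' => hall L' (List.mem_cons_of_mem _ hL'))
    refine ⟨le_trans s1 ih1, ?_, ?_⟩
    · rcases ih2 with h | hwin
      · rcases s2 with h2 | ⟨p, len, hl, hpl, h2⟩
        · exact Or.inl (by rw [h, h2])
        · exact Or.inr ⟨p, len, hl, hpl, by rw [h, h2]⟩
      · exact Or.inr hwin
    · intro L' hL' p hpl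
      rcases List.mem_cons.mp hL' with rfl | hmem
      · exact le_trans (s3 p hpl) ih1
      · exact ih3 L' hmem p hpl

lemma A_char (arr : List Int) (hne : arr ≠ []) :
    (∃ p len : Nat, 1 ≤ len ∧ p + len ≤ arr.length ∧ solution arr = fval (win arr p len)) ∧
    (∀ p len : Nat, 1 ≤ len → p + len ≤ arr.length → fval (win arr p len) ≤ solution arr) := by
  have hn : 0 < arr.length := List.length_pos_of_ne_nil hne
  have hres0 : (PySem.List.min? arr (fun x => x)).getD 0 * arr.sum = fval (win arr 0 arr.length) := by
    rw [win_zero_length]; rfl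
  have hsol : solution arr
      = (PySem.List.pyRange 1 (arr.length : Int) 1).foldl (fun res length => if length = 1 then
          arr.foldl (fun res elem => let temp := elem ^ 2; if temp > res then temp else res) res
        else solWhile arr 0 (length - 1) res) ((PySem.List.min? arr (fun x => x)).getD 0 * arr.sum) := rfl
  obtain ⟨h1, h2, h3⟩ := outerA_spec arr (PySem.List.pyRange 1 (arr.length : Int) 1)
      ((PySem.List.min? arr (fun x => x)).getD 0 * arr.sum)
      (fun L hL => (PySem.List.mem_pyRange_one.mp hL).1)
  constructor
  · rcases h2 with h | hwin
    · exact ⟨0, arr.length, by omega, by omega, by rw [hsol, h, hres0]⟩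
    · obtain ⟨p, len, hl, hpl, h⟩ := hwin
      exact ⟨p, len, hl, hpl, by rw [hsol, h]⟩
  · intro p len hl hpl
    rw [hsol]
    rcases Nat.lt_or_ge len arr.length with hlt | hge
    · have hmem : (len : Int) ∈ PySem.List.pyRange 1 (arr.length : Int) 1 := by
        rw [PySem.List.mem_pyRange_one]
        exact ⟨by exact_mod_cast hl, by exact_mod_cast hlt⟩
      have := h3 (len : Int) hmem p (by simp; omega)
      simpa using this
    · have hlen : len = arr.length := by omega
      have hp0 : p = 0 := by omega
      subst hlen; subst hp0
      exact hres0 ▸ h1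

-- ===== VERDICT (by name: the statement is the Claim_ definition above) =====
theorem solution_spec : Claim_equal_solution := by
  intro arr _ hpre
  unfold Spec_solution
  obtain ⟨⟨pa, la, hla, hpla, hA⟩, hubA⟩ := A_char arr hpre
  obtain ⟨⟨pb, lb, hlb, hplb, hB⟩, hubB⟩ := B_char arr hpre
  apply le_antisymm
  · rw [hA]
    exact (B_char arr hpre).2 pa la hla hpla
  · rw [hB]
    exact hubA pb lb hlb hplb
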